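-- pv_equiv track=rewrite | github.com/kojen-coder/spotify-music-recommender | utility/PlotlyObject.py | visible_true_false_list
-- ===== SOURCE A (Python) =====
-- def visible_true_false_list(list_length, group_length):
--     '''
--     create visible list for plotly update menu
--     :param list_length: total number of pltoly object in one graph
--     :param group_length: how many element in each group
--     :return: list of list
--     '''
--     group_num = int(list_length / group_length)
--     result_list = []
--     for i in range(group_num):
--         temp_list = [False] * i * group_length + group_length * [True] + (
--                 list_length - (i + 1) * group_length) * [
--                         False]
--         result_list.append(temp_list)
--     return result_list
-- ===== SOURCE B (Python) =====
-- def visible_true_false_list(list_length, group_length):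
--     '''
--     create visible list for plotly update menu (block-index formulation)
--     '''
--     group_num = int(list_length / group_length)
--     if group_num <= 0:
--         return []
--     blocks = [j // group_length for j in range(list_length)]
--     return [[b == i for b in blocks] for i in range(group_num)]
-- ===== Notes on version B (the rewrite author's own statement) =====
-- stated objective: alternative
-- what changed: B precomputes each position's block index (j // group_length) once and builds every row by an equality test against the group index, instead of A's per-row concatenation of [False]*..+[True]*..+[False]*.. blocks.
-- outside the precondition, e.g. on visible_true_false_list(6, 0): A raises ZeroDivisionError, B raises ZeroDivisionError
import Mathlib
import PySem

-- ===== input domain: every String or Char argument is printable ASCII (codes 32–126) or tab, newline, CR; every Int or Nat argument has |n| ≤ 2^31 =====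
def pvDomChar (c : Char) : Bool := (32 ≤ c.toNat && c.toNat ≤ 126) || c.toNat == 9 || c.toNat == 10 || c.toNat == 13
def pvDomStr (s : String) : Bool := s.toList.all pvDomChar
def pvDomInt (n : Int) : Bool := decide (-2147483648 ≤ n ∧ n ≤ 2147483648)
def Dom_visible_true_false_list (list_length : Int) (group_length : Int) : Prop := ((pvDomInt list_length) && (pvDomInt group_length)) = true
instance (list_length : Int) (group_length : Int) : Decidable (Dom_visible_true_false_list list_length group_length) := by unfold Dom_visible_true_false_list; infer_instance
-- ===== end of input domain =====

-- B replaces A's three-block list concatenation per row by precomputing each position's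
-- block index once and testing it for equality (objective: alternative decomposition).

-- ===== PORT A =====
-- `int(list_length / group_length)` (true division, then truncation toward zero) is ported
-- as Int.tdiv: exact for |arguments| ≤ 2^31 since the float quotient never rounds across an
-- integer boundary at these magnitudes.
def visible_true_false_list (list_length : Int) (group_length : Int) : List (List Bool) :=
  let group_num := list_length.tdiv group_length
  (PySem.List.pyRange 0 group_num 1).foldl
    (fun result_list i =>
      result_list ++
        [PySem.List.pyRepeat (PySem.List.pyRepeat [false] i) group_length ++
          PySem.List.pyRepeat [true] group_length ++
          PySem.List.pyRepeat [false] (list_length - (i + 1) * group_length)])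
    []

-- ===== PORT B =====
def visible_true_false_list_alt (list_length : Int) (group_length : Int) : List (List Bool) :=
  let group_num := list_length.tdiv group_length
  if group_num ≤ 0 then []
  else
    let blocks := (PySem.List.pyRange 0 list_length 1).map
      (fun j => PySem.Int.floordiv j group_length)
    (PySem.List.pyRange 0 group_num 1).map (fun i => blocks.map (fun b => b == i))

-- ===== PRECONDITION & SPEC =====
-- Pre_ excludes only group_length = 0, where Python A raises ZeroDivisionError.
def Pre_visible_true_false_list (list_length : Int) (group_length : Int) : Prop :=
  group_length ≠ 0
instance (list_length : Int) (group_length : Int) : Decidable (Pre_visible_true_false_list list_length group_length) := by unfold Pre_visible_true_false_list; infer_instance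
def pvWitness_visible_true_false_list : Int × Int := (5, 2)

def Spec_visible_true_false_list (list_length : Int) (group_length : Int) (out : List (List Bool)) : Prop := out = visible_true_false_list_alt list_length group_length
instance (list_length : Int) (group_length : Int) (out : List (List Bool)) : Decidable (Spec_visible_true_false_list list_length group_length out) := by unfold Spec_visible_true_false_list; infer_instance

-- ===== CLAIM (what is proved, stated in full; the proofs are below) =====
def Claim_equal_visible_true_false_list : Prop := ∀ (list_length : Int) (group_length : Int), Dom_visible_true_false_list list_length group_length → Pre_visible_true_false_list list_length group_length → Spec_visible_true_false_list list_length group_length (visible_true_false_list list_length group_length)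

-- ===== LEMMAS AND PROOFS =====

theorem pv_foldl_append_singleton {α β : Type} (f : α → β) (xs : List α) (init : List β) :
    xs.foldl (fun acc x => acc ++ [f x]) init = init ++ xs.map f := by
  induction xs generalizing init with
  | nil => simp
  | cons x xs ih => simp [List.foldl_cons, ih]

-- the row produced by A's body, after flattening the repeated lists
theorem pv_rowA_eq (L g i : Int) :
    PySem.List.pyRepeat (PySem.List.pyRepeat [false] i) g ++
      PySem.List.pyRepeat [true] g ++
      PySem.List.pyRepeat [false] (L - (i + 1) * g)
    = List.replicate (g.toNat * i.toNat) false ++ List.replicate g.toNat true ++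
        List.replicate (L - (i + 1) * g).toNat false := by
  simp [PySem.List.pyRepeat]

theorem pv_row_eq_pos (L g i : Int) (hg : 0 < g) (hi : 0 ≤ i)
    (hub : (i + 1) * g ≤ L) :
    List.replicate (g.toNat * i.toNat) false ++ List.replicate g.toNat true ++
        List.replicate (L - (i + 1) * g).toNat false
    = (PySem.List.pyRange 0 L 1).map (fun j => (PySem.Int.floordiv j g == i)) := by
  have hA : ((g.toNat * i.toNat : Nat) : Int) = i * g := by
    push_cast [Int.toNat_of_nonneg hg.le, Int.toNat_of_nonneg hi]; ring
  have hexp : (i + 1) * g = i * g + g := by ring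
  have hL : 0 < L := by omega
  apply List.ext_getElem
  · simp [PySem.List.length_pyRange_one]
    omega
  · intro k h1 h2
    have hkL : (k : Int) < L := by
      simp [PySem.List.length_pyRange_one] at h2; omega
    rw [List.getElem_map, PySem.List.getElem_pyRange_one]
    simp only [zero_add]
    have hfd : PySem.Int.floordiv ((0 : Int) + (k : Int)) g = i ↔
        i * g ≤ (k : Int) ∧ (k : Int) < (i + 1) * g := by
      simpa using PySem.Int.floordiv_eq_iff_of_pos (a := (k : Int)) (q := i) hg
    simp only [zero_add] at hfd
    by_cases hk1 : (k : Int) < i * g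
    · have hknum : k < g.toNat * i.toNat := by omega
      rw [List.getElem_append]
      simp only [List.length_append, List.length_replicate]
      rw [dif_pos (by omega : k < g.toNat * i.toNat + g.toNat)]
      rw [List.getElem_append, dif_pos (by simpa using hknum), List.getElem_replicate]
      have hne : ¬ PySem.Int.floordiv (k : Int) g = i := by
        intro hcontra; rcases hfd.mp hcontra with ⟨hc1, _⟩; omega
      simp [hne]
    · by_cases hk2 : (k : Int) < (i + 1) * g
      · have heq : PySem.Int.floordiv (k : Int) g = i := hfd.mpr ⟨by omega, hk2⟩
        rw [List.getElem_append]
        simp only [List.length_append, List.length_replicate]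
        rw [dif_pos (by omega : k < g.toNat * i.toNat + g.toNat)]
        rw [List.getElem_append, dif_neg (by simp; omega),
          List.getElem_replicate]
        simp [heq]
      · have hne : ¬ PySem.Int.floordiv (k : Int) g = i := by
          intro hcontra; rcases hfd.mp hcontra with ⟨_, hc2⟩; omega
        rw [List.getElem_append]
        simp only [List.length_append, List.length_replicate]
        rw [dif_neg (by omega : ¬ k < g.toNat * i.toNat + g.toNat)]
        rw [List.getElem_replicate]
        simp [hne]

-- ===== VERDICT (by name: the statement is the Claim_ definition above) =====
theorem visible_true_false_list_spec : Claim_equal_visible_true_false_list := by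
  intro L g _ hg
  unfold Spec_visible_true_false_list visible_true_false_list visible_true_false_list_alt
  by_cases hN : L.tdiv g ≤ 0
  · rw [if_pos hN]
    have hnil : PySem.List.pyRange 0 (L.tdiv g) 1 = [] :=
      PySem.List.pyRange_one_eq_nil (by omega)
    simp [hnil]
  rw [if_neg hN, pv_foldl_append_singleton, List.nil_append]
  apply List.map_congr_left
  intro i hiMem
  rw [PySem.List.mem_pyRange_one] at hiMem
  obtain ⟨hi0, hiN⟩ := hiMem
  rw [pv_rowA_eq]
  simp only [List.map_map, Function.comp_def]
  rcases lt_or_gt_of_ne hg with hneg | hpos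
  · -- g < 0: group_num ≥ 1 forces L < 0; every block is empty on both sides
    have hLneg : L < 0 := by
      by_contra hL
      rw [not_lt] at hL
      have : L.tdiv g = -(L.tdiv (-g)) := by
        rw [← Int.tdiv_neg]; simp
      have h2 : 0 ≤ L.tdiv (-g) := Int.tdiv_nonneg hL (by omega)
      omega
    -- bound: (i+1) * g ≥ L, so the trailing replicate is empty too
    have htd : L.tdiv g = (-L) / (-g) := by
      rw [show L.tdiv g = (-L).tdiv (-g) by rw [Int.neg_tdiv, Int.tdiv_neg]; ring,
        Int.tdiv_eq_ediv_of_nonneg (by omega)]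
    have hmul : (i + 1) * (-g) ≤ -L := by
      have := (Int.le_ediv_iff_mul_le (by omega : (0:Int) < -g)).mp (by omega : i + 1 ≤ (-L) / (-g))
      exact this
    have hub : L ≤ (i + 1) * g := by nlinarith
    have hgz : g.toNat = 0 := by omega
    have hrz : (L - (i + 1) * g).toNat = 0 := by omega
    rw [PySem.List.pyRange_one_eq_nil (by omega)]
    simp [hgz, hrz]
  · -- g > 0: group_num ≥ 1 forces 0 ≤ L; main case
    have hL0 : 0 ≤ L := by
      by_contra hL
      rw [not_le] at hL
      have : L.tdiv g = -((-L).tdiv g) := by rw [Int.neg_tdiv]; simp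
      have h2 : 0 ≤ (-L).tdiv g := Int.tdiv_nonneg (by omega) (by omega)
      omega
    have htd : L.tdiv g = L / g := Int.tdiv_eq_ediv_of_nonneg hL0
    have hub : (i + 1) * g ≤ L :=
      (Int.le_ediv_iff_mul_le hpos).mp (by omega : i + 1 ≤ L / g)
    exact pv_row_eq_pos L g i hpos hi0 hub
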